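-- pv_equiv track=rewrite | github.com/matthinz/aoc-2023 | day13/day13.py | find_reflections
-- ===== SOURCE A (Python) =====
-- from typing import Iterator, Optional
--
-- def find_reflections(line: list[str]) -> Iterator[int]:
--     """
--     Finds points on <line> where a symmetry exists on the left and right sides.
--     """
--     for i in range(1, len(line)):
--         symmetrical = True
--         for j in range(0, i):
--             left = i - j - 1
--             right = i + j
--             if left < 0 or right >= len(line):
--                 break
--
--             if line[left] != line[right]:
--                 symmetrical = False
--                 break
--
--         if symmetrical:
--             yield i
-- ===== SOURCE B (Python) =====
-- def find_reflections(line: list[str]):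
--     """
--     Finds points on <line> where a symmetry exists on the left and right sides.
--
--     Instead of scanning outward from each candidate center, enumerate every
--     pair of positions (a, b) with a < b and odd index-sum once; a mismatching
--     such pair breaks exactly the center i = (a + b + 1) // 2 (both members of
--     a mismatching pair always lie inside the line, so no bounds check is
--     needed).  Collect the broken centers in a set, then emit the survivors.
--     """
--     n = len(line)
--     broken = set()
--     for b in range(n):
--         for a in range(b):
--             if (a + b) % 2 == 1 and line[a] != line[b]:
--                 broken.add((a + b + 1) // 2)
--     for i in range(1, n):
--         if i not in broken:
--             yield i
-- ===== Notes on version B (the rewrite author's own statement) =====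
-- stated objective: alternative
-- what changed: Instead of scanning outward from each candidate center with a flag and break, B enumerates each index pair (a,b) with odd sum once, records the unique center (a+b+1)//2 broken by every mismatching pair in a set, and then emits the centers not in that set.
import Mathlib
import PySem

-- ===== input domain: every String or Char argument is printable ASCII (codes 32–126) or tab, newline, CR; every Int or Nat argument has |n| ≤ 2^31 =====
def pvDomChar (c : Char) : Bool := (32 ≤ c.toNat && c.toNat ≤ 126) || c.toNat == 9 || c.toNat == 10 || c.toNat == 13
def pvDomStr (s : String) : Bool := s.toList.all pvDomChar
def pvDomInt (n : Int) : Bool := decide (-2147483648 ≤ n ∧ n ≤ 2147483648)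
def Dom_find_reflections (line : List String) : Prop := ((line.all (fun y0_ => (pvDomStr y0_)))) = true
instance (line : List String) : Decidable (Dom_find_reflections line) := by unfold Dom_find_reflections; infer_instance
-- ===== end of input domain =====

-- B replaces A's per-center outward scan (flag + break) by a single enumeration of all
-- index pairs with odd sum, collecting the centers broken by mismatching pairs in a set
-- and emitting the survivors. (A is a generator; its yielded sequence is ported as the
-- returned list.)

-- ===== PORT A =====
-- inner loop over j; returns the final value of `symmetrical` (break keeps it true)
def aInner (line : List String) (i : Int) : List Int → Bool
  | [] => true
  | j :: js =>
    let left := i - j - 1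
    let right := i + j
    if left < 0 ∨ right ≥ (line.length : Int) then true
    else
      -- under the guard both indices are in range, so pyGet? is `some`;
      -- comparing the options is exactly `(line)[left] != (line)[right]`
      if PySem.List.pyGet? line left ≠ PySem.List.pyGet? line right then false
      else aInner line i js

def find_reflections (line : List String) : List Int :=
  (PySem.List.pyRange 1 (line.length : Int)).foldl
    (fun acc i =>
      if aInner line i (PySem.List.pyRange 0 i) then acc ++ [i] else acc) []

-- ===== PORT B =====
-- the set `broken`: nested loops over b and a, adding (a+b+1)//2 on an odd-sum mismatch
def bBroken (line : List String) : PySem.Set Int :=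
  (PySem.List.pyRange 0 (line.length : Int)).foldl
    (fun s b =>
      (PySem.List.pyRange 0 b).foldl
        (fun s a =>
          if PySem.Int.mod (a + b) 2 = 1 ∧ PySem.List.pyGet? line a ≠ PySem.List.pyGet? line b
          then PySem.Set.add s (PySem.Int.floordiv (a + b + 1) 2) else s) s)
    PySem.Set.empty

def find_reflections_alt (line : List String) : List Int :=
  (PySem.List.pyRange 1 (line.length : Int)).foldl
    (fun acc i => if !(PySem.Set.contains (bBroken line) i) then acc ++ [i] else acc) []

-- ===== PRECONDITION & SPEC =====
def Spec_find_reflections (line : List String) (out : List Int) : Prop := out = find_reflections_alt line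
instance (line : List String) (out : List Int) : Decidable (Spec_find_reflections line out) := by unfold Spec_find_reflections; infer_instance

-- ===== CLAIM (what is proved, stated in full; the proofs are below) =====
def Claim_equal_find_reflections : Prop := ∀ (line : List String), Dom_find_reflections line → Spec_find_reflections line (find_reflections line)

-- ===== LEMMAS AND PROOFS =====

-- A's inner loop over j0, j0+1, …, k-1 is true iff every index pair up to the
-- nearer edge (from j0 on) matches.
theorem aInner_iff (line : List String) (k : Nat) (hk : k ≤ line.length) :
    ∀ j0, j0 ≤ k →
      (aInner line (k : Int) (PySem.List.pyRange (j0 : Int) (k : Int)) = true ↔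
        ∀ j : Nat, j0 ≤ j → j < min k (line.length - k) →
          (line)[k - 1 - j]? = (line)[k + j]?) := by
  intro j0
  induction hd : k - j0 generalizing j0 with
  | zero =>
      intro hj0
      have hj : j0 = k := by omega
      subst hj
      rw [show PySem.List.pyRange (j0 : Int) (j0 : Int) = [] by
        simp [PySem.List.pyRange]]
      simp only [aInner, true_iff]
      intro j h1 h2
      omega
  | succ d ih =>
      intro hj0
      have hlt : j0 < k := by omega
      rw [PySem.List.pyRange_one_cons (by exact_mod_cast hlt)]
      simp only [aInner]
      by_cases hr : (k : Int) + (j0 : Int) ≥ (line.length : Int)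
      · -- break: right index out of range; the remaining j are vacuous
        rw [if_pos (Or.inr hr)]
        constructor
        · intro _ j h1 h2
          omega
        · intro _; rfl
      · rw [if_neg (by omega)]
        have hcl : (k : Int) - (j0 : Int) - 1 = ((k - 1 - j0 : Nat) : Int) := by omega
        have hcr : (k : Int) + (j0 : Int) = ((k + j0 : Nat) : Int) := by omega
        rw [hcl, hcr, PySem.List.pyGet?_natCast, PySem.List.pyGet?_natCast]
        by_cases heq : (line)[k - 1 - j0]? = (line)[k + j0]?
        · rw [if_neg (by simpa using heq),
            show (j0 : Int) + 1 = ((j0 + 1 : Nat) : Int) by omega]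
          rw [ih (j0 + 1) (by omega) (by omega)]
          constructor
          · intro h j h1 h2
            rcases Nat.eq_or_lt_of_le h1 with h1 | h1
            · simpa [← h1] using heq
            · exact h j h1 h2
          · intro h j h1 h2
            exact h j (by omega) h2
        · rw [if_pos (by simpa using heq)]
          simp only [Bool.false_eq_true, false_iff]
          intro h
          exact heq (h j0 le_rfl (by omega))

-- membership in a fold that conditionally adds f x to a PySem.Set
theorem mem_foldl_addIf (p : Int → Prop) [DecidablePred p] (f : Int → Int)
    (l : List Int) (s0 : PySem.Set Int) (y : Int) :
    (y ∈ l.foldl (fun s x => if p x then PySem.Set.add s (f x) else s) s0) ↔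
      y ∈ s0 ∨ ∃ x ∈ l, p x ∧ y = f x := by
  induction l generalizing s0 with
  | nil => simp
  | cons x xs ih =>
      simp only [List.foldl_cons, ih, List.mem_cons]
      split_ifs with hp
      · rw [PySem.Set.mem_add]
        constructor
        · rintro (⟨h | h⟩ | h)
          · exact Or.inl h
          · exact Or.inr ⟨x, Or.inl rfl, hp, h⟩
          · obtain ⟨z, hz, h1, h2⟩ := h
            exact Or.inr ⟨z, Or.inr hz, h1, h2⟩
        · rintro (h | ⟨z, (rfl | hz), h1, h2⟩)
          · exact Or.inl (Or.inl h)
          · exact Or.inl (Or.inr h2)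
          · exact Or.inr ⟨z, hz, h1, h2⟩
      · constructor
        · rintro (h | ⟨z, hz, h1, h2⟩)
          · exact Or.inl h
          · exact Or.inr ⟨z, Or.inr hz, h1, h2⟩
        · rintro (h | ⟨z, (rfl | hz), h1, h2⟩)
          · exact Or.inl h
          · exact absurd h1 hp
          · exact Or.inr ⟨z, hz, h1, h2⟩

-- membership in B's `broken` set, characterized over index pairs
theorem mem_bBroken (line : List String) (y : Int) :
    y ∈ bBroken line ↔
      ∃ b a : Int, 0 ≤ a ∧ a < b ∧ b < (line.length : Int) ∧
        PySem.Int.mod (a + b) 2 = 1 ∧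
        PySem.List.pyGet? line a ≠ PySem.List.pyGet? line b ∧
        y = PySem.Int.floordiv (a + b + 1) 2 := by
  unfold bBroken
  have hstep : ∀ (l : List Int) (s0 : PySem.Set Int),
      (y ∈ l.foldl (fun s b => (PySem.List.pyRange 0 b).foldl
          (fun s a =>
            if PySem.Int.mod (a + b) 2 = 1 ∧ PySem.List.pyGet? line a ≠ PySem.List.pyGet? line b
            then PySem.Set.add s (PySem.Int.floordiv (a + b + 1) 2) else s) s) s0) ↔
        y ∈ s0 ∨ ∃ b ∈ l, ∃ a ∈ PySem.List.pyRange 0 b,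
          (PySem.Int.mod (a + b) 2 = 1 ∧ PySem.List.pyGet? line a ≠ PySem.List.pyGet? line b) ∧
          y = PySem.Int.floordiv (a + b + 1) 2 := by
    intro l
    induction l with
    | nil => simp
    | cons b bs ih =>
        intro s0
        simp only [List.foldl_cons, ih, List.mem_cons,
          mem_foldl_addIf
            (fun a => PySem.Int.mod (a + b) 2 = 1 ∧
              PySem.List.pyGet? line a ≠ PySem.List.pyGet? line b)
            (fun a => PySem.Int.floordiv (a + b + 1) 2)]
        constructor
        · rintro (⟨h | ⟨a, ha, h1, h2⟩⟩ | ⟨b', hb', h⟩)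
          · exact Or.inl h
          · exact Or.inr ⟨b, Or.inl rfl, a, ha, h1, h2⟩
          · exact Or.inr ⟨b', Or.inr hb', h⟩
        · rintro (h | ⟨b', (rfl | hb'), a, ha, h1, h2⟩)
          · exact Or.inl (Or.inl h)
          · exact Or.inl (Or.inr ⟨a, ha, h1, h2⟩)
          · exact Or.inr ⟨b', hb', a, ha, h1, h2⟩
  rw [hstep]
  simp only [PySem.Set.empty, List.not_mem_nil, false_or, PySem.List.mem_pyRange_one]
  constructor
  · rintro ⟨b, ⟨_, hb⟩, a, ⟨ha, hab⟩, ⟨h1, h2⟩, h3⟩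
    exact ⟨b, a, ha, hab, hb, h1, h2, h3⟩
  · rintro ⟨b, a, ha, hab, hb, h1, h2, h3⟩
    exact ⟨b, ⟨by omega, hb⟩, a, ⟨ha, hab⟩, ⟨h1, h2⟩, h3⟩

-- the bridge: for a center 1 ≤ k < n, "no broken pair" = "all mirrored pairs match"
theorem not_mem_bBroken_iff (line : List String) (k : Nat) (hk1 : 1 ≤ k)
    (hk2 : k < line.length) :
    ((k : Int) ∉ bBroken line) ↔
      ∀ j : Nat, j < min k (line.length - k) →
        (line)[k - 1 - j]? = (line)[k + j]? := by
  rw [mem_bBroken]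
  constructor
  · intro h j hj
    by_contra hne
    apply h
    refine ⟨((k + j : Nat) : Int), ((k - 1 - j : Nat) : Int), by omega, by omega, by omega,
      ?_, ?_, ?_⟩
    · rw [PySem.Int.mod_eq_emod_of_pos (by omega)]
      omega
    · rw [PySem.List.pyGet?_natCast, PySem.List.pyGet?_natCast]
      exact hne
    · rw [PySem.Int.floordiv_eq_ediv_of_pos (by omega)]
      omega
  · rintro h ⟨b, a, ha, hab, hb, h1, h2, h3⟩
    rw [PySem.Int.mod_eq_emod_of_pos (by omega)] at h1
    rw [PySem.Int.floordiv_eq_ediv_of_pos (by omega)] at h3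
    -- a + b = 2k - 1; the pair is (k-1-j, k+j) with j = b - k
    obtain ⟨bn, rfl⟩ : ∃ m : Nat, b = (m : Int) := ⟨b.toNat, by omega⟩
    obtain ⟨an, rfl⟩ : ∃ m : Nat, a = (m : Int) := ⟨a.toNat, by omega⟩
    have hsum : an + bn + 1 = 2 * k := by omega
    have hbk : k ≤ bn := by omega
    apply h2
    rw [PySem.List.pyGet?_natCast, PySem.List.pyGet?_natCast]
    have := h (bn - k) (by omega)
    rw [show k - 1 - (bn - k) = an by omega, show k + (bn - k) = bn by omega] at this
    exact this

-- ===== VERDICT (by name: the statement is the Claim_ definition above) =====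
theorem find_reflections_spec : Claim_equal_find_reflections := by
  intro line _
  unfold Spec_find_reflections find_reflections find_reflections_alt
  rw [PySem.List.foldl_append_if (f := fun (i : Int) => i),
    PySem.List.foldl_append_if (f := fun (i : Int) => i)]
  simp only [List.nil_append, List.map_id_fun', id_eq]
  refine List.filter_congr ?_
  intro i hi
  obtain ⟨h1, h2⟩ := PySem.List.mem_pyRange_one.mp hi
  obtain ⟨k, rfl⟩ : ∃ k : Nat, i = (k : Int) := ⟨i.toNat, by omega⟩
  have hk1 : 1 ≤ k := by omega
  have hk2 : k < line.length := by omega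
  have ha := aInner_iff line k (by omega) 0 (by omega)
  rw [Nat.cast_zero] at ha
  have hb := not_mem_bBroken_iff line k hk1 hk2
  rw [Bool.eq_iff_iff, ha, Bool.not_eq_true', ← Bool.not_eq_true,
    PySem.Set.contains_iff, hb]
  exact ⟨fun h j hj => h j (by omega) hj, fun h j _ hj => h j hj⟩
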